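-- pv_equiv track=rewrite | github.com/zainkai/CS325-GA2 | vankin.py | vankins
-- ===== SOURCE A (Python) =====
-- def vankins(superList):
--   #keeps track of the max score.
--   maxScore = 0
--   #keeps track of the scores for each column of possible scores.
--   VMile = []
--   n = len(superList)
--   down = 0
--   #Initializing the array.
--   for i in range(0, n):
--     VMile.append(0)
--   #Loop through every column on the game board.
--   for j in range(n, 0, -1):
--     down = 0
--     #loops through every element in every column.
--     for i in range(n, 0, -1):
--       #adds the max possible score for the current cell we are on
--       #either adds the score below the current element or to the right which ever is larger.
--       VMile[i - 1] = superList[i-1][j-1] + max(down, VMile[i - 1])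
--       #sets down to the current index for comparision later
--       down = VMile[i - 1]
--       #takes the larger of the current score or the know max score.
--       maxScore = max(maxScore, down)
--   return maxScore
-- ===== SOURCE B (Python) =====
-- def vankins(superList):
--     # Top-down recursion with memoization: best(i, j) is the best score of a
--     # path starting at cell (i, j) and moving only down/right (boundary = 0),
--     # exactly A's per-cell optimum; the answer is the 0-floored max over cells.
--     n = len(superList)
--     memo = {}
--
--     def best(i, j):
--         if i >= n or j >= n:
--             return 0
--         if (i, j) not in memo:
--             memo[(i, j)] = superList[i][j] + max(best(i + 1, j), best(i, j + 1))
--         return memo[(i, j)]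
--
--     maxScore = 0
--     for i in range(n - 1, -1, -1):
--         for j in range(n - 1, -1, -1):
--             maxScore = max(maxScore, best(i, j))
--     return maxScore
-- ===== Notes on version B (the rewrite author's own statement) =====
-- stated objective: alternative
-- what changed: Replaces A's bottom-up DP over a rolling 1D column array (with a running 'down' accumulator) by a top-down memoized recursion best(i,j) = grid[i][j] + max(best(i+1,j), best(i,j+1)), taking the 0-floored max of best over all start cells.
import Mathlib
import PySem

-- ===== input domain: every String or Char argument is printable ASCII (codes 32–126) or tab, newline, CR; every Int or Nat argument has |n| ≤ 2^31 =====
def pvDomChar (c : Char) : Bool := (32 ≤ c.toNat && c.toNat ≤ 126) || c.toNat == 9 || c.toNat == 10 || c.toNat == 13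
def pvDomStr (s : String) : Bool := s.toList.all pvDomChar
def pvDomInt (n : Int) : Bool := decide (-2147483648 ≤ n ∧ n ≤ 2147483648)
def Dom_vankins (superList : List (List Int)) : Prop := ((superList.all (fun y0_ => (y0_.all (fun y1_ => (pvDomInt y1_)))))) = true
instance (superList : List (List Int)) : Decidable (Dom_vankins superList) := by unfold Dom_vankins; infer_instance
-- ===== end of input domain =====

-- B replaces A's rolling 1D bottom-up array by a top-down memoized recursion
-- best(i, j) over the grid (objective: alternative decomposition, same values).

-- ===== PORT A =====
-- loop body of A's inner 'for i in range(n, 0, -1)': state (maxScore, down, VMile)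
def vankinsStepA (superList : List (List Int)) (j : Int)
    (st : Int × Int × List Int) (i : Int) : Int × Int × List Int :=
  let val := PySem.List.pyGetD (PySem.List.pyGetD superList (i - 1) []) (j - 1) 0
               + max st.2.1 (PySem.List.pyGetD st.2.2 (i - 1) 0)
  (max st.1 val, val, PySem.List.pySetD st.2.2 (i - 1) val)

def vankins (superList : List (List Int)) : Int :=
  let n : Int := (superList.length : Int)
  -- for i in range(0, n): VMile.append(0)
  let VMile : List Int := (PySem.List.pyRange 0 n 1).foldl (fun v _ => v ++ [(0 : Int)]) []
  -- for j in range(n, 0, -1): down = 0; for i in range(n, 0, -1): …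
  let res := (PySem.List.pyRange n 0 (-1)).foldl
    (fun (st : Int × List Int) j =>
      let inner := (PySem.List.pyRange n 0 (-1)).foldl (vankinsStepA superList j) (st.1, 0, st.2)
      (inner.1, inner.2.2))
    (0, VMile)
  res.1

-- ===== PORT B =====
-- Source B's helper best(i, j); the Python memo dict is only a cache, the port
-- computes the identical recursion directly (indices are nonnegative).
def vankinsBest (superList : List (List Int)) (i j : Nat) : Int :=
  if _h : i < superList.length ∧ j < superList.length then
    (superList.getD i []).getD j 0
      + max (vankinsBest superList (i + 1) j) (vankinsBest superList i (j + 1))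
  else 0
termination_by (superList.length - i) + (superList.length - j)
decreasing_by all_goals omega

def vankins_alt (superList : List (List Int)) : Int :=
  let n : Int := (superList.length : Int)
  (PySem.List.pyRange (n - 1) (-1) (-1)).foldl
    (fun acc i =>
      (PySem.List.pyRange (n - 1) (-1) (-1)).foldl
        (fun a j => max a (vankinsBest superList i.toNat j.toNat)) acc)
    0

-- ===== PRECONDITION & SPEC =====
-- Pre_ excludes exactly the inputs where A raises IndexError: a row shorter
-- than the number of rows (A reads superList[i-1][j-1] for all i, j in [1, n]).
def Pre_vankins (superList : List (List Int)) : Prop :=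
  ∀ row ∈ superList, superList.length ≤ row.length
instance (superList : List (List Int)) : Decidable (Pre_vankins superList) := by
  unfold Pre_vankins; infer_instance

def pvWitness_vankins : List (List Int) := [[1, -2], [3, 4]]

def Spec_vankins (superList : List (List Int)) (out : Int) : Prop := out = vankins_alt superList
instance (superList : List (List Int)) (out : Int) : Decidable (Spec_vankins superList out) := by
  unfold Spec_vankins; infer_instance

-- ===== CLAIM (what is proved, stated in full; the proofs are below) =====
def Claim_equal_vankins : Prop :=
  ∀ (superList : List (List Int)), Dom_vankins superList → Pre_vankins superList →
    Spec_vankins superList (vankins superList)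

-- ===== LEMMAS AND PROOFS =====

theorem vankinsBest_oob (g : List (List Int)) (i j : Nat)
    (h : ¬ (i < g.length ∧ j < g.length)) : vankinsBest g i j = 0 := by
  rw [vankinsBest]; simp [h]

theorem vankinsBest_pos (g : List (List Int)) (i j : Nat)
    (hi : i < g.length) (hj : j < g.length) :
    vankinsBest g i j =
      (g.getD i []).getD j 0
        + max (vankinsBest g (i + 1) j) (vankinsBest g i (j + 1)) := by
  rw [vankinsBest]; simp [hi, hj]

-- the init loop builds a replicate-0 list
theorem foldl_append_zero (l : List Int) (init : List Int) :
    l.foldl (fun v _ => v ++ [(0 : Int)]) init = init ++ List.replicate l.length 0 := by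
  induction l generalizing init with
  | nil => simp
  | cons x t ih => rw [List.foldl_cons, ih]; simp [List.replicate_succ, List.append_assoc]

theorem getD_set_eq_if (l : List Int) (i : Nat) (v : Int) (k : Nat) (h : i < l.length) :
    (l.set i v).getD k 0 = if k = i then v else l.getD k 0 := by
  rcases eq_or_ne k i with rfl | hne
  · simp [List.getD_eq_getElem?_getD, h]
  · simp [List.getD_eq_getElem?_getD, List.getElem?_set_ne (Ne.symm hne), hne]

-- inner loop invariant: processing rows m..1 of column c turns VMile's first m
-- entries from column c+1 values into column c values, maxing maxScore on the way
theorem innerA (g : List (List Int)) (c : Nat) (hc : c < g.length) :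
    ∀ m, m ≤ g.length → ∀ (ms : Int) (V : List Int), V.length = g.length →
      (∀ k, k < g.length →
        V.getD k 0 = if m ≤ k then vankinsBest g k c else vankinsBest g k (c + 1)) →
      ∃ V' : List Int,
        (PySem.List.pyRange (m : Int) 0 (-1)).foldl (vankinsStepA g ((c : Int) + 1))
            (ms, vankinsBest g m c, V)
          = ((List.range m).foldl (fun a t => max a (vankinsBest g (m - 1 - t) c)) ms,
              vankinsBest g 0 c, V')
        ∧ V'.length = g.length
        ∧ (∀ k, k < g.length → V'.getD k 0 = vankinsBest g k c) := by
  intro m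
  induction m with
  | zero =>
    intro _ ms V hlen hinv
    refine ⟨V, ?_, hlen, fun k hk => by simpa using hinv k hk⟩
    rw [Nat.cast_zero, PySem.List.pyRange_neg_one_eq_nil le_rfl]
    simp
  | succ m ih =>
    intro hm ms V hlen hinv
    have hmn : m < g.length := by omega
    have e1 : ((m + 1 : Nat) : Int) - 1 = ((m : Nat) : Int) := by push_cast; ring
    have hcons : PySem.List.pyRange ((m + 1 : Nat) : Int) 0 (-1)
        = ((m + 1 : Nat) : Int) :: PySem.List.pyRange ((m : Nat) : Int) 0 (-1) := by
      rw [PySem.List.pyRange_neg_one_cons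
            (show (0 : Int) < ((m + 1 : Nat) : Int) by exact_mod_cast Nat.succ_pos m), e1]
    rw [hcons, List.foldl_cons]
    have hval : (g.getD m []).getD c 0 + max (vankinsBest g (m + 1) c) (V.getD m 0)
        = vankinsBest g m c := by
      rw [hinv m hmn, if_neg (by omega), ← vankinsBest_pos g m c hmn hc]
    have hstep : vankinsStepA g ((c : Int) + 1) (ms, vankinsBest g (m + 1) c, V)
          ((m + 1 : Nat) : Int)
        = (max ms (vankinsBest g m c), vankinsBest g m c, V.set m (vankinsBest g m c)) := by
      have e2 : ((c : Int) + 1) - 1 = ((c : Nat) : Int) := by ring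
      simp only [vankinsStepA, e1, e2, PySem.List.pyGetD_natCast, PySem.List.pySetD_natCast]
      have hval' : (g[m]?.getD [])[c]?.getD 0
            + max (vankinsBest g (m + 1) c) (V[m]?.getD 0) = vankinsBest g m c := by
        simpa [List.getD_eq_getElem?_getD] using hval
      simp [hval']
    rw [hstep]
    have hset : ∀ k, k < g.length → (V.set m (vankinsBest g m c)).getD k 0
        = if m ≤ k then vankinsBest g k c else vankinsBest g k (c + 1) := by
      intro k hk
      rw [getD_set_eq_if V m _ k (hlen ▸ hmn)]
      rcases eq_or_ne k m with rfl | hne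
      · simp
      · rw [if_neg hne, hinv k hk]
        by_cases hmk : m ≤ k
        · rw [if_pos (by omega), if_pos hmk]
        · rw [if_neg (by omega), if_neg hmk]
    obtain ⟨V', hfold, hlen', hinv'⟩ :=
      ih (by omega) (max ms (vankinsBest g m c)) (V.set m (vankinsBest g m c))
        (by simpa using hlen) hset
    refine ⟨V', ?_, hlen', hinv'⟩
    rw [hfold]
    have hms : (List.range (m + 1)).foldl
          (fun a t => max a (vankinsBest g (m + 1 - 1 - t) c)) ms
        = (List.range m).foldl (fun a t => max a (vankinsBest g (m - 1 - t) c))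
            (max ms (vankinsBest g m c)) := by
      rw [List.range_succ_eq_map, List.foldl_cons, List.foldl_map]
      congr 1
      funext a t
      have e3 : m + 1 - 1 - (t + 1) = m - 1 - t := by omega
      rw [e3]
    rw [hms]

-- outer loop invariant: processing columns m..1 accumulates the max over those columns
theorem outerA (g : List (List Int)) :
    ∀ m, m ≤ g.length → ∀ (ms : Int) (V : List Int), V.length = g.length →
      (∀ k, k < g.length → V.getD k 0 = vankinsBest g k m) →
      ((PySem.List.pyRange (m : Int) 0 (-1)).foldl
          (fun (st : Int × List Int) j =>
            let inner := (PySem.List.pyRange (g.length : Int) 0 (-1)).foldl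
              (vankinsStepA g j) (st.1, 0, st.2)
            (inner.1, inner.2.2))
          (ms, V)).1
        = (List.range m).foldl
            (fun acc t => (List.range g.length).foldl
              (fun a t' => max a (vankinsBest g (g.length - 1 - t') (m - 1 - t))) acc) ms := by
  intro m
  induction m with
  | zero =>
    intro _ ms V hlen hinv
    rw [Nat.cast_zero, PySem.List.pyRange_neg_one_eq_nil le_rfl]
    simp
  | succ m ih =>
    intro hm ms V hlen hinv
    have hmn : m < g.length := by omega
    have e1 : ((m + 1 : Nat) : Int) - 1 = ((m : Nat) : Int) := by push_cast; ring
    have hcons : PySem.List.pyRange ((m + 1 : Nat) : Int) 0 (-1)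
        = ((m + 1 : Nat) : Int) :: PySem.List.pyRange ((m : Nat) : Int) 0 (-1) := by
      rw [PySem.List.pyRange_neg_one_cons
            (show (0 : Int) < ((m + 1 : Nat) : Int) by exact_mod_cast Nat.succ_pos m), e1]
    rw [hcons, List.foldl_cons]
    obtain ⟨V', hfold, hlen', hinv'⟩ :=
      innerA g m hmn g.length le_rfl ms V hlen
        (fun k hk => by rw [hinv k hk, if_neg (by omega)])
    have h0 : vankinsBest g g.length m = 0 := vankinsBest_oob g _ m (by omega)
    have hj : ((m : Nat) : Int) + 1 = ((m + 1 : Nat) : Int) := by push_cast; ring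
    rw [h0, hj] at hfold
    simp only []
    rw [hfold]
    rw [ih (by omega)
          ((List.range g.length).foldl
            (fun a t => max a (vankinsBest g (g.length - 1 - t) m)) ms) V' hlen' hinv']
    have hms : (List.range (m + 1)).foldl
          (fun acc t => (List.range g.length).foldl
            (fun a t' => max a (vankinsBest g (g.length - 1 - t') (m + 1 - 1 - t))) acc) ms
        = (List.range m).foldl
            (fun acc t => (List.range g.length).foldl
              (fun a t' => max a (vankinsBest g (g.length - 1 - t') (m - 1 - t))) acc)
            ((List.range g.length).foldl
              (fun a t => max a (vankinsBest g (g.length - 1 - t) m)) ms) := by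
      rw [List.range_succ_eq_map, List.foldl_cons, List.foldl_map]
      congr 1
      funext acc t
      have e3 : m + 1 - 1 - (t + 1) = m - 1 - t := by omega
      rw [e3]
    rw [hms]

theorem A_char (g : List (List Int)) :
    vankins g = (List.range g.length).foldl
      (fun acc t => (List.range g.length).foldl
        (fun a t' => max a (vankinsBest g (g.length - 1 - t') (g.length - 1 - t))) acc) 0 := by
  have hrep : (PySem.List.pyRange 0 (g.length : Int) 1).foldl (fun v _ => v ++ [(0 : Int)]) []
      = List.replicate g.length 0 := by
    rw [foldl_append_zero]
    simp [PySem.List.length_pyRange_one]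
  simp only [vankins, hrep]
  exact outerA g g.length le_rfl 0 (List.replicate g.length 0) (by simp)
    (fun k hk => by
      rw [vankinsBest_oob g k g.length (by omega)]
      simp [List.getD_eq_getElem?_getD, hk])

theorem B_char (g : List (List Int)) :
    vankins_alt g = (List.range g.length).foldl
      (fun acc t => (List.range g.length).foldl
        (fun a t' => max a (vankinsBest g (g.length - 1 - t) (g.length - 1 - t'))) acc) 0 := by
  have htn : ∀ k : Nat, ((g.length : Int) - 1 - (k : Int)).toNat = g.length - 1 - k := by
    intro k; omega
  have hN : (((g.length : Int) - 1) - (-1)).toNat = g.length := by omega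
  simp only [vankins_alt, PySem.List.pyRange_neg_one, hN, List.foldl_map, htn]

-- fold max 0 only depends on the set of elements
theorem foldl_max_zero_eq_of_sub (l1 l2 : List Int)
    (h12 : ∀ x ∈ l1, x ∈ l2) (h21 : ∀ x ∈ l2, x ∈ l1) :
    l1.foldl max 0 = l2.foldl max 0 := by
  apply le_antisymm
  · rcases PySem.List.foldl_max_mem l1 0 with h | h
    · rw [h]; exact (PySem.List.le_foldl_max l2 0).1
    · exact (PySem.List.le_foldl_max l2 0).2 _ (h12 _ h)
  · rcases PySem.List.foldl_max_mem l2 0 with h | h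
    · rw [h]; exact (PySem.List.le_foldl_max l1 0).1
    · exact (PySem.List.le_foldl_max l1 0).2 _ (h21 _ h)

-- a nested max-fold is the max-fold over the flattened table of values
theorem nested_foldl_eq_flatten (n : Nat) (f : Nat → Nat → Int) :
    (List.range n).foldl
        (fun acc t => (List.range n).foldl (fun a t' => max a (f t t')) acc) 0
      = (((List.range n).map (fun t => (List.range n).map (fun t' => f t t'))).flatten).foldl
          max 0 := by
  rw [List.foldl_flatten, List.foldl_map]
  congr 1
  funext acc t
  rw [List.foldl_map]

-- ===== VERDICT (by name: the statement is the Claim_ definition above) =====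
theorem vankins_spec : Claim_equal_vankins := by
  intro g _ _
  unfold Spec_vankins
  rw [A_char, B_char, nested_foldl_eq_flatten, nested_foldl_eq_flatten]
  apply foldl_max_zero_eq_of_sub
  · intro x hx
    simp only [List.mem_flatten, List.mem_map, List.mem_range] at hx ⊢
    obtain ⟨l, ⟨t, ht, rfl⟩, hm⟩ := hx
    simp only [List.mem_map, List.mem_range] at hm
    obtain ⟨t', ht', rfl⟩ := hm
    exact ⟨_, ⟨t', ht', rfl⟩, by simp only [List.mem_map, List.mem_range]; exact ⟨t, ht, rfl⟩⟩
  · intro x hx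
    simp only [List.mem_flatten, List.mem_map, List.mem_range] at hx ⊢
    obtain ⟨l, ⟨t, ht, rfl⟩, hm⟩ := hx
    simp only [List.mem_map, List.mem_range] at hm
    obtain ⟨t', ht', rfl⟩ := hm
    exact ⟨_, ⟨t', ht', rfl⟩, by simp only [List.mem_map, List.mem_range]; exact ⟨t, ht, rfl⟩⟩
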